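-- pv_equiv track=rewrite | github.com/AddNap/DocQuill | packages/docquill_core/docquill/renderers/field_renderer.py | _convert_word_date_format
-- ===== SOURCE A (Python) =====
-- def _convert_word_date_format(word_format: str) -> str:
--     """
--     Convert Word date format to Python strftime format.
--
--     Args:
--         word_format: Word format string (e.g., "dd.MM.yyyy", "MM/dd/yyyy")
--
--     Returns:
--         Python strftime format string
--     """
--     # Common Word date format mappings
--     mappings = {
--         'dd': '%d',
--         'MM': '%m',
--         'yyyy': '%Y',
--         'yy': '%y',
--         'MMMM': '%B',  # Full month name
--         'MMM': '%b',   # Abbreviated month name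
--         'dddd': '%A',  # Full weekday name
--         'ddd': '%a',   # Abbreviated weekday name
--     }
--
--     result = word_format
--     # Replace in order (longer patterns first)
--     for word_pattern, python_pattern in sorted(mappings.items(), key=lambda x: -len(x[0])):
--         result = result.replace(word_pattern, python_pattern)
--
--     return result
-- ===== SOURCE B (Python) =====
-- # Single left-to-right tokenizing pass (longest token first) instead of eight full-string replace passes.
-- _TOKENS = [('yyyy', '%Y'), ('MMMM', '%B'), ('dddd', '%A'),
--            ('MMM', '%b'), ('ddd', '%a'),
--            ('dd', '%d'), ('MM', '%m'), ('yy', '%y')]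
--
--
-- def _convert_word_date_format(word_format: str) -> str:
--     out = []
--     i = 0
--     n = len(word_format)
--     while i < n:
--         for tok, rep in _TOKENS:
--             if word_format.startswith(tok, i):
--                 out.append(rep)
--                 i += len(tok)
--                 break
--         else:
--             out.append(word_format[i])
--             i += 1
--     return ''.join(out)
-- ===== Notes on version B (the rewrite author's own statement) =====
-- stated objective: alternative
-- what changed: Replaces the eight sequential full-string str.replace passes with a single left-to-right tokenizing scan that matches the Word tokens longest-first at each position and emits the strftime codes in one pass.
import Mathlib
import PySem

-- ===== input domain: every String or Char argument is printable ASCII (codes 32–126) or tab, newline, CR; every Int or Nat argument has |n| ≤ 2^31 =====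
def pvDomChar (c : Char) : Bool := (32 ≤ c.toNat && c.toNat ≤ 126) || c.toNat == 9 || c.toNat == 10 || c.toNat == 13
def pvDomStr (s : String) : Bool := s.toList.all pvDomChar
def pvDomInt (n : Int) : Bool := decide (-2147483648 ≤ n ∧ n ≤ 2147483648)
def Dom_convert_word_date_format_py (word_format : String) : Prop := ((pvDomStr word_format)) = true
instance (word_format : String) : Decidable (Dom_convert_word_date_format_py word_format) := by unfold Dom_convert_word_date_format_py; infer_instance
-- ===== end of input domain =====

-- B replaces A's eight sequential full-string replace passes by one left-to-right
-- tokenizing scan (longest token first at each position); same return value.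

-- ===== PORT A =====
-- A: build the mappings dict, sort its items by descending key length (stable),
-- then apply str.replace once per pattern, longest patterns first.
def convert_word_date_format_py (word_format : String) : String :=
  (PySem.List.sorted
      (PySem.Dict.ofList
        [("dd", "%d"), ("MM", "%m"), ("yyyy", "%Y"), ("yy", "%y"),
         ("MMMM", "%B"), ("MMM", "%b"), ("dddd", "%A"), ("ddd", "%a")]).items
      (fun x => -PySem.Str.len x.1) false).foldl
    (fun result p => PySem.Str.replace result p.1 p.2) word_format

-- ===== PORT B =====
-- B: a single scan over the characters; at each position try the 8 Word tokens
-- longest-first (Source B's for/else loop over the literal token table, unrolled),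
-- emit the strftime code or copy the character.
def convWordGo : List Char → List Char
  | [] => []
  | c :: t =>
    if List.isPrefixOf ['y','y','y','y'] (c :: t) then '%' :: 'Y' :: convWordGo (t.drop 3)
    else if List.isPrefixOf ['M','M','M','M'] (c :: t) then '%' :: 'B' :: convWordGo (t.drop 3)
    else if List.isPrefixOf ['d','d','d','d'] (c :: t) then '%' :: 'A' :: convWordGo (t.drop 3)
    else if List.isPrefixOf ['M','M','M'] (c :: t) then '%' :: 'b' :: convWordGo (t.drop 2)
    else if List.isPrefixOf ['d','d','d'] (c :: t) then '%' :: 'a' :: convWordGo (t.drop 2)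
    else if List.isPrefixOf ['d','d'] (c :: t) then '%' :: 'd' :: convWordGo (t.drop 1)
    else if List.isPrefixOf ['M','M'] (c :: t) then '%' :: 'm' :: convWordGo (t.drop 1)
    else if List.isPrefixOf ['y','y'] (c :: t) then '%' :: 'y' :: convWordGo (t.drop 1)
    else c :: convWordGo t
termination_by l => l.length
decreasing_by all_goals (simp; try omega)

def convert_word_date_format_py_alt (word_format : String) : String :=
  String.ofList (convWordGo word_format.toList)

-- ===== PRECONDITION & SPEC =====
def Spec_convert_word_date_format_py (word_format : String) (out : String) : Prop := out = convert_word_date_format_py_alt word_format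
instance (word_format : String) (out : String) : Decidable (Spec_convert_word_date_format_py word_format out) := by unfold Spec_convert_word_date_format_py; infer_instance

-- ===== CLAIM (what is proved, stated in full; the proofs are below) =====
def Claim_equal_convert_word_date_format_py : Prop := ∀ (word_format : String), Dom_convert_word_date_format_py word_format → Spec_convert_word_date_format_py word_format (convert_word_date_format_py word_format)

-- ===== LEMMAS AND PROOFS =====

-- A simple structural model of Python's str.replace with a non-empty pattern
-- (left-to-right, non-overlapping).
def repN (old new : List Char) : List Char → List Char
  | [] => []
  | c :: t =>
    if old.isPrefixOf (c :: t) then new ++ repN old new (t.drop (old.length - 1))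
    else c :: repN old new t
termination_by l => l.length
decreasing_by all_goals (simp; try omega)

lemma go_eq_repN (old new : List Char) (h : old ≠ []) :
    ∀ (fuel : Nat) (l acc : List Char), l.length ≤ fuel →
      PySem.Chars.replace.go old new fuel l acc = acc.reverse ++ repN old new l := by
  intro fuel
  induction fuel with
  | zero =>
    intro l acc hl
    have hnil : l = [] := by cases l <;> simp_all
    subst hnil
    simp [PySem.Chars.replace.go, repN]
  | succ fuel ih =>
    intro l acc hl
    cases l with
    | nil => simp [PySem.Chars.replace.go, repN]
    | cons c t =>
      obtain ⟨o, os, rfl⟩ : ∃ o os, old = o :: os := by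
        cases old with
        | nil => exact absurd rfl h
        | cons o os => exact ⟨o, os, rfl⟩
      by_cases hp : (o :: os).isPrefixOf (c :: t) = true
      · simp only [PySem.Chars.replace.go, hp, if_true]
        have hlen : (List.drop (o :: os).length (c :: t)).length ≤ fuel := by
          simp at hl ⊢; omega
        rw [ih _ _ hlen]
        have hdrop : List.drop (o :: os).length (c :: t) = List.drop ((o :: os).length - 1) t := by
          simp
        rw [hdrop]
        simp [repN, hp]
      · simp only [PySem.Chars.replace.go, hp, if_false]
        have hlen : t.length ≤ fuel := by simp at hl; omega
        rw [ih _ _ hlen]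
        simp [repN, hp]

lemma replace_eq_repN (s old new : List Char) (h : old ≠ []) :
    PySem.Chars.replace s old new = repN old new s := by
  unfold PySem.Chars.replace
  rw [if_neg (by simp [h])]
  simpa using go_eq_repN old new h s.length s [] le_rfl

lemma not_prefix_of_head_ne (x : Char) (p t : List Char) (h : t.head? ≠ some x) :
    List.isPrefixOf (x :: p) t = false := by
  cases t with
  | nil => simp [List.isPrefixOf]
  | cons a t =>
    have ha : a ≠ x := by simpa using h
    simp [List.isPrefixOf]
    intro he
    exact absurd he.symm ha

-- pattern x::x::rest does not match at a position holding c, when c ≠ x or the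
-- next character is not x
lemma not_prefix_two (x : Char) (rest : List Char) (c : Char) (X : List Char)
    (h : c = x → X.head? ≠ some x) :
    List.isPrefixOf (x :: x :: rest) (c :: X) = false := by
  by_cases hcx : c = x
  · have hh := not_prefix_of_head_ne x rest X (h hcx)
    simp [List.isPrefixOf, hcx, hh]
  · simp [List.isPrefixOf]
    intro he
    exact absurd he.symm hcx

-- a homogeneous pattern does not match when placed after 2 (resp. 3) copies of
-- its character followed by a list not starting with that character
lemma not_prefix_run2 (x : Char) (rest X : List Char) (h : X.head? ≠ some x) :
    List.isPrefixOf (x :: x :: x :: rest) (x :: x :: X) = false := by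
  have hh := not_prefix_of_head_ne x rest X h
  simp [List.isPrefixOf, hh]

lemma not_prefix_run3 (x : Char) (rest X : List Char) (h : X.head? ≠ some x) :
    List.isPrefixOf (x :: x :: x :: x :: rest) (x :: x :: x :: X) = false := by
  have hh := not_prefix_of_head_ne x rest X h
  simp [List.isPrefixOf, hh]

lemma repN_cons_skip (old new : List Char) (c : Char) (t : List Char)
    (h : old.isPrefixOf (c :: t) = false) :
    repN old new (c :: t) = c :: repN old new t := by
  simp [repN, h]

lemma repN_prefix (old new t : List Char) (h : old ≠ []) :
    repN old new (old ++ t) = new ++ repN old new t := by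
  obtain ⟨o, os, rfl⟩ : ∃ o os, old = o :: os := by
    cases old with
    | nil => exact absurd rfl h
    | cons o os => exact ⟨o, os, rfl⟩
  have hp : (o :: os).isPrefixOf ((o :: os) ++ t) = true :=
    List.isPrefixOf_iff_prefix.mpr ⟨t, rfl⟩
  simp only [List.cons_append] at hp ⊢
  simp [repN, hp, List.drop_left]

lemma repN_prefix2 (a b : Char) (new X : List Char) :
    repN [a, b] new (a :: b :: X) = new ++ repN [a, b] new X :=
  repN_prefix [a, b] new X (by simp)

lemma repN_prefix3 (a b c : Char) (new X : List Char) :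
    repN [a, b, c] new (a :: b :: c :: X) = new ++ repN [a, b, c] new X :=
  repN_prefix [a, b, c] new X (by simp)

lemma repN_prefix4 (a b c d : Char) (new X : List Char) :
    repN [a, b, c, d] new (a :: b :: c :: d :: X) = new ++ repN [a, b, c, d] new X :=
  repN_prefix [a, b, c, d] new X (by simp)

-- each pass keeps "does not start with a" for every a ≠ '%'
lemma repN_head (old new : List Char) (a : Char) (hnew : new.head? = some '%')
    (ha : a ≠ '%') (l : List Char) (h : l.head? ≠ some a) :
    (repN old new l).head? ≠ some a := by
  cases l with
  | nil => simp [repN]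
  | cons c t =>
    simp only [repN]
    split
    · cases new with
      | nil => simp at hnew
      | cons n0 ns =>
        have : n0 = '%' := by simpa using hnew
        subst this
        simp
        exact fun he => ha he.symm
    · simpa using h

lemma repN_head_pct (old : List Char) (r a : Char) (l : List Char)
    (ha : a ≠ '%') (h : l.head? ≠ some a) :
    (repN old ['%', r] l).head? ≠ some a :=
  repN_head old ['%', r] a rfl ha l h

lemma pfx_false_mono (x : Char) (t : List Char)
    (h : List.isPrefixOf [x, x] t = false) :
    List.isPrefixOf [x, x, x] t = false := by
  by_contra hne
  have h3 : List.isPrefixOf [x, x, x] t = true := by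
    cases hb : List.isPrefixOf [x, x, x] t
    · exact absurd hb hne
    · rfl
  have hpre : [x, x] <+: t :=
    List.IsPrefix.trans ⟨[x], rfl⟩ (List.isPrefixOf_iff_prefix.mp h3)
  rw [List.isPrefixOf_iff_prefix.mpr hpre] at h
  exact absurd h (by simp)

lemma head_ne_of_pfx1 (x : Char) (u : List Char)
    (h : List.isPrefixOf [x] u = false) : u.head? ≠ some x := by
  cases u with
  | nil => simp
  | cons a u =>
    intro ha
    have : a = x := by simpa using ha
    subst this
    simp [List.isPrefixOf] at h

-- the eight replace passes, in A's order
def passes : List (List Char × List Char) :=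
  [(['y','y','y','y'], ['%','Y']), (['M','M','M','M'], ['%','B']),
   (['d','d','d','d'], ['%','A']), (['M','M','M'], ['%','b']),
   (['d','d','d'], ['%','a']), (['d','d'], ['%','d']),
   (['M','M'], ['%','m']), (['y','y'], ['%','y'])]

def FF (l : List Char) : List Char :=
  passes.foldl (fun r p => repN p.1 p.2 r) l

lemma FF_nil : FF [] = [] := by simp [FF, passes, List.foldl, repN]

lemma FF_yyyy (t : List Char) : FF ('y'::'y'::'y'::'y'::t) = '%'::'Y'::FF t := by
  simp only [FF, passes, List.foldl]
  rw [repN_prefix4 'y' 'y' 'y' 'y' ['%','Y']]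
  simp only [List.cons_append, List.nil_append]
  rw [repN_cons_skip ['M','M','M','M'] ['%','B'] '%',
      repN_cons_skip ['M','M','M','M'] ['%','B'] 'Y',
      repN_cons_skip ['d','d','d','d'] ['%','A'] '%',
      repN_cons_skip ['d','d','d','d'] ['%','A'] 'Y',
      repN_cons_skip ['M','M','M'] ['%','b'] '%',
      repN_cons_skip ['M','M','M'] ['%','b'] 'Y',
      repN_cons_skip ['d','d','d'] ['%','a'] '%',
      repN_cons_skip ['d','d','d'] ['%','a'] 'Y',
      repN_cons_skip ['d','d'] ['%','d'] '%',
      repN_cons_skip ['d','d'] ['%','d'] 'Y',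
      repN_cons_skip ['M','M'] ['%','m'] '%',
      repN_cons_skip ['M','M'] ['%','m'] 'Y',
      repN_cons_skip ['y','y'] ['%','y'] '%',
      repN_cons_skip ['y','y'] ['%','y'] 'Y']
  all_goals apply not_prefix_two <;> (intro hc; exact absurd hc (by decide))

lemma FF_MMMM (t : List Char) : FF ('M'::'M'::'M'::'M'::t) = '%'::'B'::FF t := by
  simp only [FF, passes, List.foldl]
  rw [repN_cons_skip ['y','y','y','y'] ['%','Y'] 'M',
      repN_cons_skip ['y','y','y','y'] ['%','Y'] 'M',
      repN_cons_skip ['y','y','y','y'] ['%','Y'] 'M',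
      repN_cons_skip ['y','y','y','y'] ['%','Y'] 'M',
      repN_prefix4 'M' 'M' 'M' 'M' ['%','B']]
  simp only [List.cons_append, List.nil_append]
  rw [repN_cons_skip ['d','d','d','d'] ['%','A'] '%',
      repN_cons_skip ['d','d','d','d'] ['%','A'] 'B',
      repN_cons_skip ['M','M','M'] ['%','b'] '%',
      repN_cons_skip ['M','M','M'] ['%','b'] 'B',
      repN_cons_skip ['d','d','d'] ['%','a'] '%',
      repN_cons_skip ['d','d','d'] ['%','a'] 'B',
      repN_cons_skip ['d','d'] ['%','d'] '%',
      repN_cons_skip ['d','d'] ['%','d'] 'B',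
      repN_cons_skip ['M','M'] ['%','m'] '%',
      repN_cons_skip ['M','M'] ['%','m'] 'B',
      repN_cons_skip ['y','y'] ['%','y'] '%',
      repN_cons_skip ['y','y'] ['%','y'] 'B']
  all_goals apply not_prefix_two <;> (intro hc; exact absurd hc (by decide))

lemma FF_dddd (t : List Char) : FF ('d'::'d'::'d'::'d'::t) = '%'::'A'::FF t := by
  simp only [FF, passes, List.foldl]
  rw [repN_cons_skip ['y','y','y','y'] ['%','Y'] 'd',
      repN_cons_skip ['y','y','y','y'] ['%','Y'] 'd',
      repN_cons_skip ['y','y','y','y'] ['%','Y'] 'd',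
      repN_cons_skip ['y','y','y','y'] ['%','Y'] 'd',
      repN_cons_skip ['M','M','M','M'] ['%','B'] 'd',
      repN_cons_skip ['M','M','M','M'] ['%','B'] 'd',
      repN_cons_skip ['M','M','M','M'] ['%','B'] 'd',
      repN_cons_skip ['M','M','M','M'] ['%','B'] 'd',
      repN_prefix4 'd' 'd' 'd' 'd' ['%','A']]
  simp only [List.cons_append, List.nil_append]
  rw [repN_cons_skip ['M','M','M'] ['%','b'] '%',
      repN_cons_skip ['M','M','M'] ['%','b'] 'A',
      repN_cons_skip ['d','d','d'] ['%','a'] '%',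
      repN_cons_skip ['d','d','d'] ['%','a'] 'A',
      repN_cons_skip ['d','d'] ['%','d'] '%',
      repN_cons_skip ['d','d'] ['%','d'] 'A',
      repN_cons_skip ['M','M'] ['%','m'] '%',
      repN_cons_skip ['M','M'] ['%','m'] 'A',
      repN_cons_skip ['y','y'] ['%','y'] '%',
      repN_cons_skip ['y','y'] ['%','y'] 'A']
  all_goals apply not_prefix_two <;> (intro hc; exact absurd hc (by decide))

lemma FF_MMM (t : List Char) (ht : t.head? ≠ some 'M') :
    FF ('M'::'M'::'M'::t) = '%'::'b'::FF t := by
  simp only [FF, passes, List.foldl]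
  rw [repN_cons_skip ['y','y','y','y'] ['%','Y'] 'M',
      repN_cons_skip ['y','y','y','y'] ['%','Y'] 'M',
      repN_cons_skip ['y','y','y','y'] ['%','Y'] 'M',
      repN_cons_skip ['M','M','M','M'] ['%','B'] 'M',
      repN_cons_skip ['M','M','M','M'] ['%','B'] 'M',
      repN_cons_skip ['M','M','M','M'] ['%','B'] 'M',
      repN_cons_skip ['d','d','d','d'] ['%','A'] 'M',
      repN_cons_skip ['d','d','d','d'] ['%','A'] 'M',
      repN_cons_skip ['d','d','d','d'] ['%','A'] 'M',
      repN_prefix3 'M' 'M' 'M' ['%','b']]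
  simp only [List.cons_append, List.nil_append]
  rw [repN_cons_skip ['d','d','d'] ['%','a'] '%',
      repN_cons_skip ['d','d','d'] ['%','a'] 'b',
      repN_cons_skip ['d','d'] ['%','d'] '%',
      repN_cons_skip ['d','d'] ['%','d'] 'b',
      repN_cons_skip ['M','M'] ['%','m'] '%',
      repN_cons_skip ['M','M'] ['%','m'] 'b',
      repN_cons_skip ['y','y'] ['%','y'] '%',
      repN_cons_skip ['y','y'] ['%','y'] 'b']
  all_goals (first
    | (apply not_prefix_two; intro hc; first
        | exact absurd hc (by decide)
        | ((repeat (first | exact ht | apply repN_head_pct | decide)); done))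
    | (apply not_prefix_run3 <;> ((repeat (first | exact ht | apply repN_head_pct | decide)); done))
    | (apply not_prefix_run2 <;> ((repeat (first | exact ht | apply repN_head_pct | decide)); done)))

lemma FF_ddd (t : List Char) (ht : t.head? ≠ some 'd') :
    FF ('d'::'d'::'d'::t) = '%'::'a'::FF t := by
  simp only [FF, passes, List.foldl]
  rw [repN_cons_skip ['y','y','y','y'] ['%','Y'] 'd',
      repN_cons_skip ['y','y','y','y'] ['%','Y'] 'd',
      repN_cons_skip ['y','y','y','y'] ['%','Y'] 'd',
      repN_cons_skip ['M','M','M','M'] ['%','B'] 'd',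
      repN_cons_skip ['M','M','M','M'] ['%','B'] 'd',
      repN_cons_skip ['M','M','M','M'] ['%','B'] 'd',
      repN_cons_skip ['d','d','d','d'] ['%','A'] 'd',
      repN_cons_skip ['d','d','d','d'] ['%','A'] 'd',
      repN_cons_skip ['d','d','d','d'] ['%','A'] 'd',
      repN_cons_skip ['M','M','M'] ['%','b'] 'd',
      repN_cons_skip ['M','M','M'] ['%','b'] 'd',
      repN_cons_skip ['M','M','M'] ['%','b'] 'd',
      repN_prefix3 'd' 'd' 'd' ['%','a']]
  simp only [List.cons_append, List.nil_append]
  rw [repN_cons_skip ['d','d'] ['%','d'] '%',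
      repN_cons_skip ['d','d'] ['%','d'] 'a',
      repN_cons_skip ['M','M'] ['%','m'] '%',
      repN_cons_skip ['M','M'] ['%','m'] 'a',
      repN_cons_skip ['y','y'] ['%','y'] '%',
      repN_cons_skip ['y','y'] ['%','y'] 'a']
  all_goals (first
    | (apply not_prefix_two; intro hc; first
        | exact absurd hc (by decide)
        | ((repeat (first | exact ht | apply repN_head_pct | decide)); done))
    | (apply not_prefix_run3 <;> ((repeat (first | exact ht | apply repN_head_pct | decide)); done))
    | (apply not_prefix_run2 <;> ((repeat (first | exact ht | apply repN_head_pct | decide)); done)))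

lemma FF_dd (t : List Char) (ht : t.head? ≠ some 'd') :
    FF ('d'::'d'::t) = '%'::'d'::FF t := by
  simp only [FF, passes, List.foldl]
  rw [repN_cons_skip ['y','y','y','y'] ['%','Y'] 'd',
      repN_cons_skip ['y','y','y','y'] ['%','Y'] 'd',
      repN_cons_skip ['M','M','M','M'] ['%','B'] 'd',
      repN_cons_skip ['M','M','M','M'] ['%','B'] 'd',
      repN_cons_skip ['d','d','d','d'] ['%','A'] 'd',
      repN_cons_skip ['d','d','d','d'] ['%','A'] 'd',
      repN_cons_skip ['M','M','M'] ['%','b'] 'd',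
      repN_cons_skip ['M','M','M'] ['%','b'] 'd',
      repN_cons_skip ['d','d','d'] ['%','a'] 'd',
      repN_cons_skip ['d','d','d'] ['%','a'] 'd',
      repN_prefix2 'd' 'd' ['%','d']]
  simp only [List.cons_append, List.nil_append]
  rw [repN_cons_skip ['M','M'] ['%','m'] '%',
      repN_cons_skip ['M','M'] ['%','m'] 'd',
      repN_cons_skip ['y','y'] ['%','y'] '%',
      repN_cons_skip ['y','y'] ['%','y'] 'd']
  all_goals (first
    | (apply not_prefix_two; intro hc; first
        | exact absurd hc (by decide)
        | ((repeat (first | exact ht | apply repN_head_pct | decide)); done))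
    | (apply not_prefix_run3 <;> ((repeat (first | exact ht | apply repN_head_pct | decide)); done))
    | (apply not_prefix_run2 <;> ((repeat (first | exact ht | apply repN_head_pct | decide)); done)))

lemma FF_MM (t : List Char) (ht : t.head? ≠ some 'M') :
    FF ('M'::'M'::t) = '%'::'m'::FF t := by
  simp only [FF, passes, List.foldl]
  rw [repN_cons_skip ['y','y','y','y'] ['%','Y'] 'M',
      repN_cons_skip ['y','y','y','y'] ['%','Y'] 'M',
      repN_cons_skip ['M','M','M','M'] ['%','B'] 'M',
      repN_cons_skip ['M','M','M','M'] ['%','B'] 'M',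
      repN_cons_skip ['d','d','d','d'] ['%','A'] 'M',
      repN_cons_skip ['d','d','d','d'] ['%','A'] 'M',
      repN_cons_skip ['M','M','M'] ['%','b'] 'M',
      repN_cons_skip ['M','M','M'] ['%','b'] 'M',
      repN_cons_skip ['d','d','d'] ['%','a'] 'M',
      repN_cons_skip ['d','d','d'] ['%','a'] 'M',
      repN_cons_skip ['d','d'] ['%','d'] 'M',
      repN_cons_skip ['d','d'] ['%','d'] 'M',
      repN_prefix2 'M' 'M' ['%','m']]
  simp only [List.cons_append, List.nil_append]
  rw [repN_cons_skip ['y','y'] ['%','y'] '%',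
      repN_cons_skip ['y','y'] ['%','y'] 'm']
  all_goals (first
    | (apply not_prefix_two; intro hc; first
        | exact absurd hc (by decide)
        | ((repeat (first | exact ht | apply repN_head_pct | decide)); done))
    | (apply not_prefix_run3 <;> ((repeat (first | exact ht | apply repN_head_pct | decide)); done))
    | (apply not_prefix_run2 <;> ((repeat (first | exact ht | apply repN_head_pct | decide)); done)))

lemma FF_yy (t : List Char) (hyy : List.isPrefixOf ['y','y'] t = false) :
    FF ('y'::'y'::t) = '%'::'y'::FF t := by
  simp only [FF, passes, List.foldl]
  rw [repN_cons_skip ['y','y','y','y'] ['%','Y'] 'y',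
      repN_cons_skip ['y','y','y','y'] ['%','Y'] 'y',
      repN_cons_skip ['M','M','M','M'] ['%','B'] 'y',
      repN_cons_skip ['M','M','M','M'] ['%','B'] 'y',
      repN_cons_skip ['d','d','d','d'] ['%','A'] 'y',
      repN_cons_skip ['d','d','d','d'] ['%','A'] 'y',
      repN_cons_skip ['M','M','M'] ['%','b'] 'y',
      repN_cons_skip ['M','M','M'] ['%','b'] 'y',
      repN_cons_skip ['d','d','d'] ['%','a'] 'y',
      repN_cons_skip ['d','d','d'] ['%','a'] 'y',
      repN_cons_skip ['d','d'] ['%','d'] 'y',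
      repN_cons_skip ['d','d'] ['%','d'] 'y',
      repN_cons_skip ['M','M'] ['%','m'] 'y',
      repN_cons_skip ['M','M'] ['%','m'] 'y',
      repN_prefix2 'y' 'y' ['%','y']]
  simp only [List.cons_append, List.nil_append]
  all_goals first
    | exact hyy
    | exact pfx_false_mono 'y' t hyy
    | (apply not_prefix_two
       intro hc
       exact absurd hc (by decide))

lemma FF_nomatch (c : Char) (t : List Char)
    (hd : c = 'd' → t.head? ≠ some 'd')
    (hM : c = 'M' → t.head? ≠ some 'M')
    (hy : c = 'y' → t.head? ≠ some 'y') :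
    FF (c :: t) = c :: FF t := by
  simp only [FF, passes, List.foldl]
  rw [repN_cons_skip ['y','y','y','y'] ['%','Y'] c,
      repN_cons_skip ['M','M','M','M'] ['%','B'] c,
      repN_cons_skip ['d','d','d','d'] ['%','A'] c,
      repN_cons_skip ['M','M','M'] ['%','b'] c,
      repN_cons_skip ['d','d','d'] ['%','a'] c,
      repN_cons_skip ['d','d'] ['%','d'] c,
      repN_cons_skip ['M','M'] ['%','m'] c,
      repN_cons_skip ['y','y'] ['%','y'] c]
  all_goals (apply not_prefix_two; intro hc; (repeat (first | exact hd hc | exact hM hc | exact hy hc | apply repN_head_pct | decide)); done)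

-- step lemmas for B's scanner
lemma go_nil : convWordGo [] = [] := by simp [convWordGo]

lemma go_yyyy (u : List Char) :
    convWordGo ('y'::'y'::'y'::'y'::u) = '%'::'Y'::convWordGo u := by
  simp [convWordGo, List.isPrefixOf]

lemma go_MMMM (u : List Char) :
    convWordGo ('M'::'M'::'M'::'M'::u) = '%'::'B'::convWordGo u := by
  simp [convWordGo, List.isPrefixOf]

lemma go_dddd (u : List Char) :
    convWordGo ('d'::'d'::'d'::'d'::u) = '%'::'A'::convWordGo u := by
  simp [convWordGo, List.isPrefixOf]

lemma go_MMM (u : List Char) (h : List.isPrefixOf ['M'] u = false) :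
    convWordGo ('M'::'M'::'M'::u) = '%'::'b'::convWordGo u := by
  simp [convWordGo, List.isPrefixOf, h]

lemma go_ddd (u : List Char) (h : List.isPrefixOf ['d'] u = false) :
    convWordGo ('d'::'d'::'d'::u) = '%'::'a'::convWordGo u := by
  simp [convWordGo, List.isPrefixOf, h]

lemma go_dd (u : List Char) (h1 : List.isPrefixOf ['d','d'] u = false)
    (h2 : List.isPrefixOf ['d'] u = false) :
    convWordGo ('d'::'d'::u) = '%'::'d'::convWordGo u := by
  simp [convWordGo, List.isPrefixOf, h1, h2]

lemma go_MM (u : List Char) (h1 : List.isPrefixOf ['M','M'] u = false)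
    (h2 : List.isPrefixOf ['M'] u = false) :
    convWordGo ('M'::'M'::u) = '%'::'m'::convWordGo u := by
  simp [convWordGo, List.isPrefixOf, h1, h2]

lemma go_yy (u : List Char) (h : List.isPrefixOf ['y','y'] u = false) :
    convWordGo ('y'::'y'::u) = '%'::'y'::convWordGo u := by
  simp [convWordGo, List.isPrefixOf, h]

lemma go_none (c : Char) (u : List Char)
    (g1 : List.isPrefixOf ['y','y','y','y'] (c :: u) = false)
    (g2 : List.isPrefixOf ['M','M','M','M'] (c :: u) = false)
    (g3 : List.isPrefixOf ['d','d','d','d'] (c :: u) = false)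
    (g4 : List.isPrefixOf ['M','M','M'] (c :: u) = false)
    (g5 : List.isPrefixOf ['d','d','d'] (c :: u) = false)
    (g6 : List.isPrefixOf ['d','d'] (c :: u) = false)
    (g7 : List.isPrefixOf ['M','M'] (c :: u) = false)
    (g8 : List.isPrefixOf ['y','y'] (c :: u) = false) :
    convWordGo (c :: u) = c :: convWordGo u := by
  simp [convWordGo, g1, g2, g3, g4, g5, g6, g7, g8]

lemma FF_eq_go (n : Nat) : ∀ (l : List Char), l.length ≤ n → FF l = convWordGo l := by
  induction n with
  | zero =>
    intro l hl
    cases l with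
    | nil => rw [FF_nil, go_nil]
    | cons c t => simp at hl
  | succ n ih =>
    intro l hl
    cases l with
    | nil => rw [FF_nil, go_nil]
    | cons c t =>
      by_cases h1 : List.isPrefixOf ['y','y','y','y'] (c :: t) = true
      · obtain ⟨u, hu⟩ := List.isPrefixOf_iff_prefix.mp h1
        have hu' : 'y'::'y'::'y'::'y'::u = c :: t := hu
        injection hu' with hc ht
        subst hc; subst ht
        have hlen : u.length ≤ n := by simp at hl; omega
        rw [FF_yyyy, go_yyyy, ih u hlen]
      · by_cases h2 : List.isPrefixOf ['M','M','M','M'] (c :: t) = true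
        · obtain ⟨u, hu⟩ := List.isPrefixOf_iff_prefix.mp h2
          have hu' : 'M'::'M'::'M'::'M'::u = c :: t := hu
          injection hu' with hc ht
          subst hc; subst ht
          have hlen : u.length ≤ n := by simp at hl; omega
          rw [FF_MMMM, go_MMMM, ih u hlen]
        · by_cases h3 : List.isPrefixOf ['d','d','d','d'] (c :: t) = true
          · obtain ⟨u, hu⟩ := List.isPrefixOf_iff_prefix.mp h3
            have hu' : 'd'::'d'::'d'::'d'::u = c :: t := hu
            injection hu' with hc ht
            subst hc; subst ht
            have hlen : u.length ≤ n := by simp at hl; omega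
            rw [FF_dddd, go_dddd, ih u hlen]
          · by_cases h4 : List.isPrefixOf ['M','M','M'] (c :: t) = true
            · obtain ⟨u, hu⟩ := List.isPrefixOf_iff_prefix.mp h4
              have hu' : 'M'::'M'::'M'::u = c :: t := hu
              injection hu' with hc ht
              subst hc; subst ht
              have hM1 : List.isPrefixOf ['M'] u = false := Bool.eq_false_iff.mpr h2
              have hlen : u.length ≤ n := by simp at hl; omega
              rw [FF_MMM u (head_ne_of_pfx1 'M' u hM1), go_MMM u hM1, ih u hlen]
            · by_cases h5 : List.isPrefixOf ['d','d','d'] (c :: t) = true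
              · obtain ⟨u, hu⟩ := List.isPrefixOf_iff_prefix.mp h5
                have hu' : 'd'::'d'::'d'::u = c :: t := hu
                injection hu' with hc ht
                subst hc; subst ht
                have hd1 : List.isPrefixOf ['d'] u = false := Bool.eq_false_iff.mpr h3
                have hlen : u.length ≤ n := by simp at hl; omega
                rw [FF_ddd u (head_ne_of_pfx1 'd' u hd1), go_ddd u hd1, ih u hlen]
              · by_cases h6 : List.isPrefixOf ['d','d'] (c :: t) = true
                · obtain ⟨u, hu⟩ := List.isPrefixOf_iff_prefix.mp h6
                  have hu' : 'd'::'d'::u = c :: t := hu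
                  injection hu' with hc ht
                  subst hc; subst ht
                  have hd2 : List.isPrefixOf ['d','d'] u = false := Bool.eq_false_iff.mpr h3
                  have hd1 : List.isPrefixOf ['d'] u = false := Bool.eq_false_iff.mpr h5
                  have hlen : u.length ≤ n := by simp at hl; omega
                  rw [FF_dd u (head_ne_of_pfx1 'd' u hd1), go_dd u hd2 hd1, ih u hlen]
                · by_cases h7 : List.isPrefixOf ['M','M'] (c :: t) = true
                  · obtain ⟨u, hu⟩ := List.isPrefixOf_iff_prefix.mp h7
                    have hu' : 'M'::'M'::u = c :: t := hu
                    injection hu' with hc ht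
                    subst hc; subst ht
                    have hM2 : List.isPrefixOf ['M','M'] u = false := Bool.eq_false_iff.mpr h2
                    have hM1 : List.isPrefixOf ['M'] u = false := Bool.eq_false_iff.mpr h4
                    have hlen : u.length ≤ n := by simp at hl; omega
                    rw [FF_MM u (head_ne_of_pfx1 'M' u hM1), go_MM u hM2 hM1, ih u hlen]
                  · by_cases h8 : List.isPrefixOf ['y','y'] (c :: t) = true
                    · obtain ⟨u, hu⟩ := List.isPrefixOf_iff_prefix.mp h8
                      have hu' : 'y'::'y'::u = c :: t := hu
                      injection hu' with hc ht
                      subst hc; subst ht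
                      have hy2 : List.isPrefixOf ['y','y'] u = false := Bool.eq_false_iff.mpr h1
                      have hlen : u.length ≤ n := by simp at hl; omega
                      rw [FF_yy u hy2, go_yy u hy2, ih u hlen]
                    · have h1f : List.isPrefixOf ['y','y','y','y'] (c :: t) = false := Bool.eq_false_iff.mpr h1
                      have h2f : List.isPrefixOf ['M','M','M','M'] (c :: t) = false := Bool.eq_false_iff.mpr h2
                      have h3f : List.isPrefixOf ['d','d','d','d'] (c :: t) = false := Bool.eq_false_iff.mpr h3
                      have h4f : List.isPrefixOf ['M','M','M'] (c :: t) = false := Bool.eq_false_iff.mpr h4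
                      have h5f : List.isPrefixOf ['d','d','d'] (c :: t) = false := Bool.eq_false_iff.mpr h5
                      have h6f : List.isPrefixOf ['d','d'] (c :: t) = false := Bool.eq_false_iff.mpr h6
                      have h7f : List.isPrefixOf ['M','M'] (c :: t) = false := Bool.eq_false_iff.mpr h7
                      have h8f : List.isPrefixOf ['y','y'] (c :: t) = false := Bool.eq_false_iff.mpr h8
                      have hd : c = 'd' → t.head? ≠ some 'd' := by
                        intro hc; subst hc
                        exact head_ne_of_pfx1 'd' t h6f
                      have hM : c = 'M' → t.head? ≠ some 'M' := by
                        intro hc; subst hc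
                        exact head_ne_of_pfx1 'M' t h7f
                      have hy : c = 'y' → t.head? ≠ some 'y' := by
                        intro hc; subst hc
                        exact head_ne_of_pfx1 'y' t h8f
                      have hlen : t.length ≤ n := by simp at hl; omega
                      rw [FF_nomatch c t hd hM hy,
                          go_none c t h1f h2f h3f h4f h5f h6f h7f h8f, ih t hlen]

lemma portA_toList (w : String) :
    (convert_word_date_format_py w).toList = FF w.toList := by
  unfold convert_word_date_format_py
  rw [show PySem.List.sorted
        (PySem.Dict.ofList
          [("dd", "%d"), ("MM", "%m"), ("yyyy", "%Y"), ("yy", "%y"),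
           ("MMMM", "%B"), ("MMM", "%b"), ("dddd", "%A"), ("ddd", "%a")]).items
        (fun x => -PySem.Str.len x.1) false
      = [("yyyy", "%Y"), ("MMMM", "%B"), ("dddd", "%A"), ("MMM", "%b"),
         ("ddd", "%a"), ("dd", "%d"), ("MM", "%m"), ("yy", "%y")] from by decide]
  simp only [List.foldl, PySem.Str.toList_replace]
  rw [replace_eq_repN, replace_eq_repN, replace_eq_repN, replace_eq_repN,
      replace_eq_repN, replace_eq_repN, replace_eq_repN, replace_eq_repN]
  · rfl
  all_goals decide

-- ===== VERDICT (by name: the statement is the Claim_ definition above) =====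
theorem convert_word_date_format_py_spec : Claim_equal_convert_word_date_format_py := by
  intro w _
  unfold Spec_convert_word_date_format_py convert_word_date_format_py_alt
  apply String.toList_inj.mp
  rw [String.toList_ofList, portA_toList]
  exact FF_eq_go w.toList.length w.toList le_rfl
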